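-- pv_equiv track=rewrite | github.com/thien78/UI | client_set_connection.py | set_door_status
-- ===== SOURCE A (Python) =====
-- def set_door_status(door_command, current_door_states=None):
--     """
--     Processes a door command and returns updated door states without sending to server.
--
--     Args:
--         door_command (str): Door command in the format 'position_action'
--                            (e.g., 'fl_open', 'rr_lock', 't_unlock')
--         current_door_states (dict, optional): Current door states. If None, uses defaults.
--
--     Returns:
--         tuple: (success, updated_door_states, message)
--     """
--     # Door command mapping
--     door_command_map = {
--         # Front Left door commands
--         'fl_open': ('FrontLeft', 0, 'open'),
--         'fl_close': ('FrontLeft', 0, 'close'),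
--         'fl_lock': ('FrontLeft', 1, 'lock'),
--         'fl_unlock': ('FrontLeft', 1, 'unlock'),
--
--         # Front Right door commands
--         'fr_open': ('FrontRight', 0, 'open'),
--         'fr_close': ('FrontRight', 0, 'close'),
--         'fr_lock': ('FrontRight', 1, 'lock'),
--         'fr_unlock': ('FrontRight', 1, 'unlock'),
--
--         # Rear Left door commands
--         'rl_open': ('RearLeft', 0, 'open'),
--         'rl_close': ('RearLeft', 0, 'close'),
--         'rl_lock': ('RearLeft', 1, 'lock'),
--         'rl_unlock': ('RearLeft', 1, 'unlock'),
--
--         # Rear Right door commands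
--         'rr_open': ('RearRight', 0, 'open'),
--         'rr_close': ('RearRight', 0, 'close'),
--         'rr_lock': ('RearRight', 1, 'lock'),
--         'rr_unlock': ('RearRight', 1, 'unlock'),
--
--         # Trunk commands
--         't_open': ('Trunk', 0, 'open'),
--         't_close': ('Trunk', 0, 'close'),
--         't_lock': ('Trunk', 1, 'lock'),
--         't_unlock': ('Trunk', 1, 'unlock')
--     }
--
--     # Default door states if not provided
--     door_states = {
--         "FrontLeft": ["close", "lock"],
--         "FrontRight": ["close", "lock"],
--         "RearLeft": ["close", "lock"],
--         "RearRight": ["close", "lock"],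
--         "Trunk": ["close", "lock"]
--     }
--
--     # Use provided door states if available
--     if current_door_states:
--         for door, state in current_door_states.items():
--             if door in door_states:
--                 door_states[door] = state
--
--     # Check if the command is valid
--     if door_command not in door_command_map:
--         valid_commands = ', '.join(door_command_map.keys())
--         return False, door_states, f"Invalid door command. Valid commands: {valid_commands}"
--
--     # Process the door command
--     door, index, value = door_command_map[door_command]
--     door_state = door_states[door].copy()
--     door_state[index] = value
--     door_states[door] = door_state
--
--     return True, door_states, f"Updated {door} state to {door_state[0]}, {door_state[1]}"
-- ===== SOURCE B (Python) =====
-- def set_door_status(door_command, current_door_states=None):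
--     """Same behaviour as A, rebuilt from two small maps (prefix, action) instead of one 20-entry table."""
--     prefix_map = {'fl': 'FrontLeft', 'fr': 'FrontRight', 'rl': 'RearLeft', 'rr': 'RearRight', 't': 'Trunk'}
--     action_map = {'open': (0, 'open'), 'close': (0, 'close'), 'lock': (1, 'lock'), 'unlock': (1, 'unlock')}
--
--     provided = dict(current_door_states) if current_door_states else {}
--     door_states = {d: provided.get(d, ["close", "lock"]) for d in prefix_map.values()}
--
--     valid_commands = [f"{p}_{a}" for p in prefix_map for a in action_map]
--     if door_command not in valid_commands:
--         return False, door_states, f"Invalid door command. Valid commands: {', '.join(valid_commands)}"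
--
--     pos, _, act = door_command.rpartition('_')
--     door = prefix_map[pos]
--     index, value = action_map[act]
--     state = list(door_states[door])
--     state[index] = value
--     door_states[door] = state
--     return True, door_states, f"Updated {door} state to {state[0]}, {state[1]}"
-- ===== Notes on version B (the rewrite author's own statement) =====
-- stated objective: idiomatic
-- what changed: B replaces A's monolithic 20-entry command table with two small maps (door prefix, action), builds the valid-command list as their product, parses a valid command with rpartition('_'), and builds the door-state dict by a per-door comprehension over get() with a default instead of A's default-then-overwrite merge loop.
import Mathlib
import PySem

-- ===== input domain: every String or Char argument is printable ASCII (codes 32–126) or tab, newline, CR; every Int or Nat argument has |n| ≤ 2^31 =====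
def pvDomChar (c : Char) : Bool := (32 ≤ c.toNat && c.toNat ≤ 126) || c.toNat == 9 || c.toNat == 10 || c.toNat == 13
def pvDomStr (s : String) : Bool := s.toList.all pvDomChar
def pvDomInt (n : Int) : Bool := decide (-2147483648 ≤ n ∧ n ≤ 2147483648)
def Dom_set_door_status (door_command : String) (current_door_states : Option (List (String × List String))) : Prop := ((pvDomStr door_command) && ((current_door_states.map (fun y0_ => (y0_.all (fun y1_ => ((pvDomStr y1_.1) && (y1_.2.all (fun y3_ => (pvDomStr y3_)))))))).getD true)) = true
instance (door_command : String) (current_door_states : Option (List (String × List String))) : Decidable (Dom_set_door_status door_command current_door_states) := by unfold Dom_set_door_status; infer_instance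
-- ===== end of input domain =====

-- B rebuilds the 20-entry command table from two small maps (door prefix × action) and parses the
-- command with rpartition instead of one monolithic lookup; objective: idiomatic. Return value only
-- (the Python functions never mutate their arguments).

-- ===== PORT A =====
def aCmdMap : PySem.Dict String (String × Int × String) := PySem.Dict.ofList
  [("fl_open", ("FrontLeft", 0, "open")), ("fl_close", ("FrontLeft", 0, "close")),
   ("fl_lock", ("FrontLeft", 1, "lock")), ("fl_unlock", ("FrontLeft", 1, "unlock")),
   ("fr_open", ("FrontRight", 0, "open")), ("fr_close", ("FrontRight", 0, "close")),
   ("fr_lock", ("FrontRight", 1, "lock")), ("fr_unlock", ("FrontRight", 1, "unlock")),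
   ("rl_open", ("RearLeft", 0, "open")), ("rl_close", ("RearLeft", 0, "close")),
   ("rl_lock", ("RearLeft", 1, "lock")), ("rl_unlock", ("RearLeft", 1, "unlock")),
   ("rr_open", ("RearRight", 0, "open")), ("rr_close", ("RearRight", 0, "close")),
   ("rr_lock", ("RearRight", 1, "lock")), ("rr_unlock", ("RearRight", 1, "unlock")),
   ("t_open", ("Trunk", 0, "open")), ("t_close", ("Trunk", 0, "close")),
   ("t_lock", ("Trunk", 1, "lock")), ("t_unlock", ("Trunk", 1, "unlock"))]

def aDefaults : PySem.Dict String (List String) := PySem.Dict.ofList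
  [("FrontLeft", ["close", "lock"]), ("FrontRight", ["close", "lock"]),
   ("RearLeft", ["close", "lock"]), ("RearRight", ["close", "lock"]),
   ("Trunk", ["close", "lock"])]

-- literal port of A; door_state[index] = value and door_state[0]/door_state[1] are ported with the
-- total pySetD/pyGetD, exact under Pre_ (which excludes exactly the IndexError inputs)
def set_door_status (door_command : String) (current_door_states : Option (List (String × List String))) : Bool × (List (String × List String)) × String :=
  let door_states : PySem.Dict String (List String) :=
    match current_door_states with
    | none => aDefaults                                    -- `if current_door_states:` falsy: None
    | some l =>
      if l.isEmpty then aDefaults                          -- falsy: empty dict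
      else l.foldl (fun d p => if d.contains p.1 then d.insert p.1 p.2 else d) aDefaults
  if aCmdMap.contains door_command = false then
    (false, door_states.items,
      "Invalid door command. Valid commands: " ++ PySem.Str.join ", " aCmdMap.keys)
  else
    let t := aCmdMap.getD door_command ("", 0, "")         -- key present: getD is exact here
    let door_state := PySem.List.pySetD (door_states.getD t.1 []) t.2.1 t.2.2
    let door_states := door_states.insert t.1 door_state
    (true, door_states.items,
      "Updated " ++ t.1 ++ " state to " ++ PySem.List.pyGetD door_state 0 "" ++ ", " ++ PySem.List.pyGetD door_state 1 "")

-- ===== PORT B =====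
def bPrefixMap : PySem.Dict String String := PySem.Dict.ofList
  [("fl", "FrontLeft"), ("fr", "FrontRight"), ("rl", "RearLeft"), ("rr", "RearRight"), ("t", "Trunk")]

def bActionMap : PySem.Dict String (Int × String) := PySem.Dict.ofList
  [("open", (0, "open")), ("close", (0, "close")), ("lock", (1, "lock")), ("unlock", (1, "unlock"))]

-- hand port (exact) of s.rpartition('_') projected to (before, after): split at the LAST '_',
-- and ("", s) when there is no '_' (Python returns ('', '', s) then)
def bRpartitionUnderscore (s : String) : String × String :=
  let cs := s.toList
  match cs.reverse.findIdx? (fun c => c == '_') with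
  | none => ("", s)
  | some k =>
    let i := cs.length - 1 - k
    (String.ofList (cs.take i), String.ofList (cs.drop (i + 1)))

def set_door_status_alt (door_command : String) (current_door_states : Option (List (String × List String))) : Bool × (List (String × List String)) × String :=
  let provided : PySem.Dict String (List String) :=
    match current_door_states with
    | none => PySem.Dict.empty
    | some l => if l.isEmpty then PySem.Dict.empty else PySem.Dict.ofList l
  let door_states : PySem.Dict String (List String) :=
    PySem.Dict.ofList (bPrefixMap.values.map (fun d => (d, provided.getD d ["close", "lock"])))
  let valid : List String := bPrefixMap.keys.flatMap (fun p => bActionMap.keys.map (fun a => p ++ "_" ++ a))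
  if valid.contains door_command = false then
    (false, door_states.items,
      "Invalid door command. Valid commands: " ++ PySem.Str.join ", " valid)
  else
    let pa := bRpartitionUnderscore door_command
    let door := bPrefixMap.getD pa.1 ""                    -- key present: getD is exact here
    let iv := bActionMap.getD pa.2 (0, "")
    let state := PySem.List.pySetD (door_states.getD door []) iv.1 iv.2
    let door_states := door_states.insert door state
    (true, door_states.items,
      "Updated " ++ door ++ " state to " ++ PySem.List.pyGetD state 0 "" ++ ", " ++ PySem.List.pyGetD state 1 "")

-- ===== PRECONDITION & SPEC =====
-- Pre_ excludes exactly the inputs where A raises IndexError: a VALID command whose target door was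
-- supplied (last occurrence wins, as in dict()) with a state list of length < 2 — A then does
-- door_state[index] = value / reads door_state[1] on a too-short list. (B raises there too.)
def Pre_set_door_status (door_command : String) (current_door_states : Option (List (String × List String))) : Prop :=
  (match List.lookup door_command
      [("fl_open", "FrontLeft"), ("fl_close", "FrontLeft"), ("fl_lock", "FrontLeft"), ("fl_unlock", "FrontLeft"),
       ("fr_open", "FrontRight"), ("fr_close", "FrontRight"), ("fr_lock", "FrontRight"), ("fr_unlock", "FrontRight"),
       ("rl_open", "RearLeft"), ("rl_close", "RearLeft"), ("rl_lock", "RearLeft"), ("rl_unlock", "RearLeft"),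
       ("rr_open", "RearRight"), ("rr_close", "RearRight"), ("rr_lock", "RearRight"), ("rr_unlock", "RearRight"),
       ("t_open", "Trunk"), ("t_close", "Trunk"), ("t_lock", "Trunk"), ("t_unlock", "Trunk")] with
   | none => true
   | some d =>
     match (current_door_states.getD []).reverse.find? (fun p => p.1 == d) with
     | none => true
     | some p => decide (2 ≤ p.2.length)) = true
instance (door_command : String) (current_door_states : Option (List (String × List String))) : Decidable (Pre_set_door_status door_command current_door_states) := by unfold Pre_set_door_status; infer_instance

def pvWitness_set_door_status : String × (Option (List (String × List String))) :=
  ("fl_open", some [("Trunk", ["open", "unlock"]), ("FrontLeft", ["open", "lock"])])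

def Spec_set_door_status (door_command : String) (current_door_states : Option (List (String × List String))) (out : Bool × (List (String × List String)) × String) : Prop := out = set_door_status_alt door_command current_door_states
instance (door_command : String) (current_door_states : Option (List (String × List String))) (out : Bool × (List (String × List String)) × String) : Decidable (Spec_set_door_status door_command current_door_states out) := by unfold Spec_set_door_status; infer_instance

-- ===== CLAIM (what is proved, stated in full; the proofs are below) =====
def Claim_equal_set_door_status : Prop := ∀ (door_command : String) (current_door_states : Option (List (String × List String))), Dom_set_door_status door_command current_door_states → Pre_set_door_status door_command current_door_states → Spec_set_door_status door_command current_door_states (set_door_status door_command current_door_states)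

-- ===== LEMMAS AND PROOFS =====

-- the effective state of door d after A's merge loop (last occurrence of d in l wins), default v
def lgD (l : List (String × List String)) (d : String) (v : List String) : List String :=
  match l.reverse.find? (fun p => p.1 == d) with
  | none => v
  | some p => p.2

def dict5 (v1 v2 v3 v4 v5 : List String) : PySem.Dict String (List String) :=
  PySem.Dict.mk [("FrontLeft", v1), ("FrontRight", v2), ("RearLeft", v3), ("RearRight", v4), ("Trunk", v5)]

theorem lgD_cons (p : String × List String) (t : List (String × List String)) (d : String) (v : List String) :
    lgD (p :: t) d v = if p.1 == d then lgD t d p.2 else lgD t d v := by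
  simp only [lgD, List.reverse_cons, List.find?_append]
  cases h : t.reverse.find? (fun q => q.1 == d) with
  | some q => simp
  | none => by_cases hp : p.1 == d <;> simp [List.find?, hp]

-- A's merge loop characterised door-by-door
theorem mergeA (l : List (String × List String)) : ∀ (v1 v2 v3 v4 v5 : List String),
    l.foldl (fun d p => if d.contains p.1 then d.insert p.1 p.2 else d) (dict5 v1 v2 v3 v4 v5) =
      dict5 (lgD l "FrontLeft" v1) (lgD l "FrontRight" v2) (lgD l "RearLeft" v3)
            (lgD l "RearRight" v4) (lgD l "Trunk" v5) := by
  induction l with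
  | nil => intro v1 v2 v3 v4 v5; simp [lgD]
  | cons p t ih =>
    obtain ⟨k, s⟩ := p
    intro v1 v2 v3 v4 v5
    rw [List.foldl_cons]
    by_cases h1 : k = "FrontLeft"
    · subst h1
      have hstep : (if (dict5 v1 v2 v3 v4 v5).contains "FrontLeft" then (dict5 v1 v2 v3 v4 v5).insert "FrontLeft" s else (dict5 v1 v2 v3 v4 v5)) = dict5 s v2 v3 v4 v5 := by
        apply PySem.Dict.ext; simp [dict5, PySem.Dict.contains, PySem.Dict.insert]
      rw [hstep, ih]; simp [lgD_cons]
    · by_cases h2 : k = "FrontRight"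
      · subst h2
        have hstep : (if (dict5 v1 v2 v3 v4 v5).contains "FrontRight" then (dict5 v1 v2 v3 v4 v5).insert "FrontRight" s else (dict5 v1 v2 v3 v4 v5)) = dict5 v1 s v3 v4 v5 := by
          apply PySem.Dict.ext; simp [dict5, PySem.Dict.contains, PySem.Dict.insert]
        rw [hstep, ih]; simp [lgD_cons]
      · by_cases h3 : k = "RearLeft"
        · subst h3
          have hstep : (if (dict5 v1 v2 v3 v4 v5).contains "RearLeft" then (dict5 v1 v2 v3 v4 v5).insert "RearLeft" s else (dict5 v1 v2 v3 v4 v5)) = dict5 v1 v2 s v4 v5 := by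
            apply PySem.Dict.ext; simp [dict5, PySem.Dict.contains, PySem.Dict.insert]
          rw [hstep, ih]; simp [lgD_cons]
        · by_cases h4 : k = "RearRight"
          · subst h4
            have hstep : (if (dict5 v1 v2 v3 v4 v5).contains "RearRight" then (dict5 v1 v2 v3 v4 v5).insert "RearRight" s else (dict5 v1 v2 v3 v4 v5)) = dict5 v1 v2 v3 s v5 := by
              apply PySem.Dict.ext; simp [dict5, PySem.Dict.contains, PySem.Dict.insert]
            rw [hstep, ih]; simp [lgD_cons]
          · by_cases h5 : k = "Trunk"
            · subst h5
              have hstep : (if (dict5 v1 v2 v3 v4 v5).contains "Trunk" then (dict5 v1 v2 v3 v4 v5).insert "Trunk" s else (dict5 v1 v2 v3 v4 v5)) = dict5 v1 v2 v3 v4 s := by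
                apply PySem.Dict.ext; simp [dict5, PySem.Dict.contains, PySem.Dict.insert]
              rw [hstep, ih]; simp [lgD_cons]
            · have h1' : "FrontLeft" ≠ k := fun h => h1 h.symm
              have h2' : "FrontRight" ≠ k := fun h => h2 h.symm
              have h3' : "RearLeft" ≠ k := fun h => h3 h.symm
              have h4' : "RearRight" ≠ k := fun h => h4 h.symm
              have h5' : "Trunk" ≠ k := fun h => h5 h.symm
              have hstep : (if (dict5 v1 v2 v3 v4 v5).contains k then (dict5 v1 v2 v3 v4 v5).insert k s else (dict5 v1 v2 v3 v4 v5)) = dict5 v1 v2 v3 v4 v5 := by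
                simp [dict5, PySem.Dict.contains, h1', h2', h3', h4', h5']
              rw [hstep, ih]
              simp [lgD_cons, h1, h2, h3, h4, h5]

-- dict(l).get(d, v) is the last occurrence of d in l (else v)
theorem getD_ofList_lgD (l : List (String × List String)) (d : String) (v : List String) :
    (PySem.Dict.ofList l).getD d v = lgD l d v := by
  induction l using List.reverseRecOn with
  | nil => simp [PySem.Dict.ofList, PySem.Dict.update, lgD]
  | append_singleton t p ih =>
    have hof : PySem.Dict.ofList (t ++ [p]) = (PySem.Dict.ofList t).insert p.1 p.2 := by
      simp [PySem.Dict.ofList, PySem.Dict.update, List.foldl_append]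
    rw [hof, PySem.Dict.getD_insert]
    by_cases hp : d = p.1
    · rw [if_pos hp]
      simp [lgD, hp]
    · rw [if_neg hp, ih]
      have hbe : (p.1 == d) = false := by simp; exact fun h => hp h.symm
      simp only [lgD, List.reverse_append, List.reverse_singleton, List.singleton_append,
        List.find?, hbe]

-- B's door_states comprehension as an explicit 5-entry dict
theorem bDict_eq (g : String → List String) :
    PySem.Dict.ofList ((["FrontLeft", "FrontRight", "RearLeft", "RearRight", "Trunk"] : List String).map (fun d => (d, g d))) =
      dict5 (g "FrontLeft") (g "FrontRight") (g "RearLeft") (g "RearRight") (g "Trunk") := by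
  apply PySem.Dict.ext
  simp [PySem.Dict.ofList, PySem.Dict.update, PySem.Dict.insert, PySem.Dict.empty, dict5]

def twenty : List String :=
  ["fl_open", "fl_close", "fl_lock", "fl_unlock", "fr_open", "fr_close", "fr_lock", "fr_unlock",
   "rl_open", "rl_close", "rl_lock", "rl_unlock", "rr_open", "rr_close", "rr_lock", "rr_unlock",
   "t_open", "t_close", "t_lock", "t_unlock"]

-- the merged door_states both programs reach, as a function of the supplied entries l
def mdict (l : List (String × List String)) : PySem.Dict String (List String) :=
  dict5 (lgD l "FrontLeft" ["close", "lock"]) (lgD l "FrontRight" ["close", "lock"])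
        (lgD l "RearLeft" ["close", "lock"]) (lgD l "RearRight" ["close", "lock"])
        (lgD l "Trunk" ["close", "lock"])

def outA (cmd : String) (l : List (String × List String)) : Bool × (List (String × List String)) × String :=
  if aCmdMap.contains cmd = false then
    (false, (mdict l).items, "Invalid door command. Valid commands: " ++ PySem.Str.join ", " aCmdMap.keys)
  else
    let t := aCmdMap.getD cmd ("", 0, "")
    let st := PySem.List.pySetD ((mdict l).getD t.1 []) t.2.1 t.2.2
    (true, ((mdict l).insert t.1 st).items,
      "Updated " ++ t.1 ++ " state to " ++ PySem.List.pyGetD st 0 "" ++ ", " ++ PySem.List.pyGetD st 1 "")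

def outB (cmd : String) (l : List (String × List String)) : Bool × (List (String × List String)) × String :=
  if twenty.contains cmd = false then
    (false, (mdict l).items, "Invalid door command. Valid commands: " ++ PySem.Str.join ", " twenty)
  else
    let pa := bRpartitionUnderscore cmd
    let door := bPrefixMap.getD pa.1 ""
    let iv := bActionMap.getD pa.2 (0, "")
    let st := PySem.List.pySetD ((mdict l).getD door []) iv.1 iv.2
    (true, ((mdict l).insert door st).items,
      "Updated " ++ door ++ " state to " ++ PySem.List.pyGetD st 0 "" ++ ", " ++ PySem.List.pyGetD st 1 "")

theorem A_eq_none (cmd : String) : set_door_status cmd none = outA cmd [] := rfl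

theorem B_eq_none (cmd : String) : set_door_status_alt cmd none = outB cmd [] := rfl

theorem A_eq_some (cmd : String) (l : List (String × List String)) (he : l.isEmpty = false) :
    set_door_status cmd (some l) = outA cmd l := by
  unfold set_door_status outA mdict
  have hd : aDefaults = dict5 ["close", "lock"] ["close", "lock"] ["close", "lock"] ["close", "lock"] ["close", "lock"] := rfl
  simp only [he, Bool.false_eq_true, if_false, hd, mergeA]

theorem B_eq_some (cmd : String) (l : List (String × List String)) (he : l.isEmpty = false) :
    set_door_status_alt cmd (some l) = outB cmd l := by
  unfold set_door_status_alt outB mdict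
  have hv : bPrefixMap.values = ["FrontLeft", "FrontRight", "RearLeft", "RearRight", "Trunk"] := rfl
  have hk : bPrefixMap.keys.flatMap (fun p => bActionMap.keys.map (fun a => p ++ "_" ++ a)) = twenty := rfl
  simp only [he, Bool.false_eq_true, if_false, hv, hk, getD_ofList_lgD, bDict_eq]

set_option maxRecDepth 8192 in
theorem outAB (cmd : String) (l : List (String × List String)) : outA cmd l = outB cmd l := by
  by_cases hc : cmd ∈ twenty
  · fin_cases hc <;> rfl
  · have hA : aCmdMap.contains cmd = false := by
      rw [PySem.Dict.contains_eq_decide_mem_keys]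
      simpa [show aCmdMap.keys = twenty from rfl] using hc
    have hB : twenty.contains cmd = false := by simpa using hc
    unfold outA outB
    rw [hA, hB]
    norm_num
    decide

-- ===== VERDICT (by name: the statement is the Claim_ definition above) =====
theorem set_door_status_spec : Claim_equal_set_door_status := by
  intro cmd cds _hdom _hpre
  show set_door_status cmd cds = set_door_status_alt cmd cds
  rcases cds with _ | l
  · rw [A_eq_none, B_eq_none, outAB]
  · cases he : l.isEmpty
    · rw [A_eq_some cmd l he, B_eq_some cmd l he, outAB]
    · have : l = [] := List.isEmpty_iff.mp he
      subst this
      rw [show set_door_status cmd (some []) = outA cmd [] from rfl,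
          show set_door_status_alt cmd (some []) = outB cmd [] from rfl, outAB]
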